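-- pv_equiv track=rewrite | github.com/PearioTv/ayatix | bot.py | welcome_text
-- ===== SOURCE A (Python) =====
-- def welcome_text(name: str, users: dict, bot_name: str) -> str:
--     vals = list(users.values())
--     private_c  = sum(1 for u in vals if u.get("type") == "private")
--     group_c    = sum(1 for u in vals if u.get("type") in ("supergroup", "group"))
--     channel_c  = sum(1 for u in vals if u.get("type") == "channel")
--
--     return (
--         f"مرحباً بك {name} في بوت {bot_name} 👋\n\n"
--         "✨ يقدم هذا البوت خدمات إسلامية متكاملة:\n\n"
--         "📖 القرآن الكريم — بأصوات 10 قراء مشهورين\n"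
--         "📿 الأذكار — صباح / مساء / نوم / وضوء...\n"
--         "🏰 حصن المسلم — 133 باباً من الأدعية\n"
--         "🎴 بطاقات القرآن — لكل سور القرآن (صورة + صوت)\n"
--         "✨ أسماء الله الحسنى — مع المعنى\n"
--         "🎥 فيديوهات قرآنية عشوائية\n"
--         "🖼️ صور إسلامية عشوائية\n"
--         "🌾 محاضرات ودروس دينية\n\n"
--         "📊 إحصائيات:\n"
--         f"  👤 محادثات: {private_c}\n"
--         f"  👥 مجموعات: {group_c}\n"
--         f"  📢 قنوات: {channel_c}\n\n"
--         "⬇️ اختر من القائمة:"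
--     )
-- ===== SOURCE B (Python) =====
-- def welcome_text(name: str, users: dict, bot_name: str) -> str:
--     tally = {}
--     for u in users.values():
--         t = u.get("type")
--         tally[t] = tally.get(t, 0) + 1
--     private_c = tally.get("private", 0)
--     group_c   = tally.get("supergroup", 0) + tally.get("group", 0)
--     channel_c = tally.get("channel", 0)
--
--     return (
--         f"مرحباً بك {name} في بوت {bot_name} 👋\n\n"
--         "✨ يقدم هذا البوت خدمات إسلامية متكاملة:\n\n"
--         "📖 القرآن الكريم — بأصوات 10 قراء مشهورين\n"
--         "📿 الأذكار — صباح / مساء / نوم / وضوء...\n"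
--         "🏰 حصن المسلم — 133 باباً من الأدعية\n"
--         "🎴 بطاقات القرآن — لكل سور القرآن (صورة + صوت)\n"
--         "✨ أسماء الله الحسنى — مع المعنى\n"
--         "🎥 فيديوهات قرآنية عشوائية\n"
--         "🖼️ صور إسلامية عشوائية\n"
--         "🌾 محاضرات ودروس دينية\n\n"
--         "📊 إحصائيات:\n"
--         f"  👤 محادثات: {private_c}\n"
--         f"  👥 مجموعات: {group_c}\n"
--         f"  📢 قنوات: {channel_c}\n\n"
--         "⬇️ اختر من القائمة:"
--     )
-- ===== Notes on version B (the rewrite author's own statement) =====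
-- stated objective: idiomatic
-- what changed: B makes one pass over users.values() building a frequency table of u.get('type') and reads the three counts from the table, instead of A's three separate generator scans over the values.
import Mathlib
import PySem

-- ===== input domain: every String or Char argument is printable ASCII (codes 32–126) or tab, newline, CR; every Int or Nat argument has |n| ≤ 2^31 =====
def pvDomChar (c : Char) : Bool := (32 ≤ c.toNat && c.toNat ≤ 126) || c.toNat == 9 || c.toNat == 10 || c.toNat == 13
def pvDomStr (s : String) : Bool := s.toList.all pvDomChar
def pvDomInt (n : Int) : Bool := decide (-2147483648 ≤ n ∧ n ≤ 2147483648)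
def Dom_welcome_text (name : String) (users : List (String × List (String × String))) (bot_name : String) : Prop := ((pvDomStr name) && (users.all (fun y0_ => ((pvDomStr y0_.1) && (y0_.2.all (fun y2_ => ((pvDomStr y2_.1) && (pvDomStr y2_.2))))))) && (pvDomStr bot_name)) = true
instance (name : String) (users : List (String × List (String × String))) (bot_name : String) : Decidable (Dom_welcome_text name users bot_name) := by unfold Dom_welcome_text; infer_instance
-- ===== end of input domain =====

-- B replaces A's three separate scans over users.values() by one scan building a
-- frequency table of u.get("type"), read three times (objective: idiomatic/alternative).

-- shared message pieces (the identical f-string literal of both Pythons)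
def wtHead : String := "مرحباً بك "
def wtBot : String := " في بوت "
def wtBody : String := " 👋\n\n✨ يقدم هذا البوت خدمات إسلامية متكاملة:\n\n📖 القرآن الكريم — بأصوات 10 قراء مشهورين\n📿 الأذكار — صباح / مساء / نوم / وضوء...\n🏰 حصن المسلم — 133 باباً من الأدعية\n🎴 بطاقات القرآن — لكل سور القرآن (صورة + صوت)\n✨ أسماء الله الحسنى — مع المعنى\n🎥 فيديوهات قرآنية عشوائية\n🖼️ صور إسلامية عشوائية\n🌾 محاضرات ودروس دينية\n\n📊 إحصائيات:\n  👤 محادثات: "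
def wtGroups : String := "\n  👥 مجموعات: "
def wtChannels : String := "\n  📢 قنوات: "
def wtTail : String := "\n\n⬇️ اختر من القائمة:"

-- u.get("type") for one user dict
def wtType (u : List (String × String)) : Option String := (PySem.Dict.ofList u).get? "type"

-- ===== PORT A =====
def welcome_text (name : String) (users : List (String × List (String × String))) (bot_name : String) : String :=
  let vals := (PySem.Dict.ofList users).values
  let private_c : Int := vals.foldl (fun acc u => if wtType u == some "private" then acc + 1 else acc) 0
  let group_c : Int := vals.foldl (fun acc u => if (wtType u == some "supergroup" || wtType u == some "group") then acc + 1 else acc) 0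
  let channel_c : Int := vals.foldl (fun acc u => if wtType u == some "channel" then acc + 1 else acc) 0
  wtHead ++ name ++ wtBot ++ bot_name ++ wtBody ++ PySem.Int.toStr private_c ++
    wtGroups ++ PySem.Int.toStr group_c ++ wtChannels ++ PySem.Int.toStr channel_c ++ wtTail

-- ===== PORT B =====
def welcome_text_alt (name : String) (users : List (String × List (String × String))) (bot_name : String) : String :=
  let tally : PySem.Dict (Option String) Int :=
    ((PySem.Dict.ofList users).values).foldl
      (fun d u => d.modify (wtType u) 0 (· + 1)) PySem.Dict.empty
  let private_c : Int := tally.getD (some "private") 0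
  let group_c : Int := tally.getD (some "supergroup") 0 + tally.getD (some "group") 0
  let channel_c : Int := tally.getD (some "channel") 0
  wtHead ++ name ++ wtBot ++ bot_name ++ wtBody ++ PySem.Int.toStr private_c ++
    wtGroups ++ PySem.Int.toStr group_c ++ wtChannels ++ PySem.Int.toStr channel_c ++ wtTail

-- ===== PRECONDITION & SPEC =====
def Spec_welcome_text (name : String) (users : List (String × List (String × String))) (bot_name : String) (out : String) : Prop := out = welcome_text_alt name users bot_name
instance (name : String) (users : List (String × List (String × String))) (bot_name : String) (out : String) : Decidable (Spec_welcome_text name users bot_name out) := by unfold Spec_welcome_text; infer_instance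

-- ===== CLAIM (what is proved, stated in full; the proofs are below) =====
def Claim_equal_welcome_text : Prop := ∀ (name : String) (users : List (String × List (String × String))) (bot_name : String), Dom_welcome_text name users bot_name → Spec_welcome_text name users bot_name (welcome_text name users bot_name)

-- ===== LEMMAS AND PROOFS =====

-- counting a single value by an if-fold equals List.count
theorem wt_foldl_count {α : Type} [BEq α] [LawfulBEq α] (t : List α) (v : α) (n : Int) :
    t.foldl (fun acc x => if x == v then acc + 1 else acc) n = n + (t.count v : Int) := by
  induction t generalizing n with
  | nil => simp
  | cons a t ih =>
    by_cases h : a = v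
    · subst h; simp [ih]; ring
    · simp [h, ih, beq_iff_eq]

-- counting a disjunction of two distinct values by an if-fold equals the sum of the counts
theorem wt_foldl_count_two {α : Type} [BEq α] [LawfulBEq α] (t : List α) (a b : α)
    (hab : a ≠ b) (n : Int) :
    t.foldl (fun acc x => if (x == a || x == b) then acc + 1 else acc) n
      = n + (t.count a : Int) + (t.count b : Int) := by
  induction t generalizing n with
  | nil => simp
  | cons x t ih =>
    by_cases ha : x = a
    · subst ha; simp [hab, ih]; ring
    · by_cases hb : x = b
      · subst hb; simp [ha, ih]; ring
      · simp [ha, hb, ih, beq_iff_eq]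

-- B's single tally-building pass is Counter over the mapped types
theorem wt_tally_eq_counter (vals : List (List (String × String))) :
    vals.foldl (fun d u => d.modify (wtType u) 0 (· + 1)) PySem.Dict.empty
      = PySem.Dict.counter (vals.map wtType) := by
  rw [PySem.Dict.counter_eq_foldl, List.foldl_map]

-- ===== VERDICT (by name: the statement is the Claim_ definition above) =====

theorem welcome_text_spec : Claim_equal_welcome_text := by
  intro name users bot_name _
  unfold Spec_welcome_text welcome_text welcome_text_alt
  rw [wt_tally_eq_counter]
  simp only [PySem.Dict.getD_counter]
  simp only [show ∀ (v : Option String),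
        ((PySem.Dict.ofList users).values).foldl (fun acc u => if wtType u == v then acc + 1 else acc) (0 : Int)
          = ((((PySem.Dict.ofList users).values).map wtType).count v : Int) from
      fun v => by rw [← List.foldl_map (f := wtType)
                        (g := fun acc x => if x == v then acc + 1 else acc),
                      wt_foldl_count]; ring]
  rw [show ((PySem.Dict.ofList users).values).foldl
        (fun acc u => if (wtType u == some "supergroup" || wtType u == some "group") then acc + 1 else acc) (0 : Int)
          = ((((PySem.Dict.ofList users).values).map wtType).count (some "supergroup") : Int)
            + ((((PySem.Dict.ofList users).values).map wtType).count (some "group") : Int) from by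
      rw [← List.foldl_map (f := wtType)
            (g := fun acc x => if (x == some "supergroup" || x == some "group") then acc + 1 else acc),
          wt_foldl_count_two _ _ _ (by decide)]; ring]
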